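-- pv_equiv track=rewrite | github.com/DrUlysses/RScrawler | analyzer/main.py | reverse_keys
-- ===== SOURCE A (Python) =====
-- def reverse_keys(data):
--     new_values = []
--     for value in reversed(data.values()):
--         new_values.append(value)
--     i = 0
--     for key in data.keys():
--         data[key] = new_values[i]
--         i += 1
--     return data
-- ===== SOURCE B (Python) =====
-- def reverse_keys(data):
--     keys = list(data)
--     n = len(keys)
--     for i in range(n // 2):
--         a, b = keys[i], keys[n - 1 - i]
--         data[a], data[b] = data[b], data[a]
--     return data
-- ===== Notes on version B (the rewrite author's own statement) =====
-- stated objective: alternative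
-- what changed: Instead of materialising the full reversed value list and reassigning every key, B snapshots the keys once and reverses the values in place with a two-pointer swap of symmetric pairs (n//2 swaps, no auxiliary value list).
import Mathlib
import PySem

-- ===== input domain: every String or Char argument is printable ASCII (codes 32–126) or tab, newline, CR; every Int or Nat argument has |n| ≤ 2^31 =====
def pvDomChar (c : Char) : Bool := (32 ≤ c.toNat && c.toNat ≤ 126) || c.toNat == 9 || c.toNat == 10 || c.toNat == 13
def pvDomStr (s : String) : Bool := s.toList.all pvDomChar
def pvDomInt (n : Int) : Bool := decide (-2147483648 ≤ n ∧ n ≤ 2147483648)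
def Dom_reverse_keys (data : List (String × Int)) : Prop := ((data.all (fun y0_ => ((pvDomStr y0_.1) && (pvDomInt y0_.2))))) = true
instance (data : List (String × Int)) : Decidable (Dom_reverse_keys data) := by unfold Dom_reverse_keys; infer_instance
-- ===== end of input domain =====

-- B reverses the dict's values by an in-place two-pointer swap over a key snapshot, instead of
-- materialising the reversed value list first (objective: alternative decomposition; both A and B
-- mutate the dict in place in Python — the equivalence proved here is about the return value).

-- ===== PORT A =====
-- loop body of A's second loop: data[key] = new_values[i]; i += 1
-- (new_values[i] is always in range here, so pyGetD with default 0 is exact)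
def pvAstep (nv : List Int) (st : PySem.Dict String Int × Int) (key : String) :
    PySem.Dict String Int × Int :=
  (st.1.insert key (PySem.List.pyGetD nv st.2 0), st.2 + 1)

def reverse_keys (data : List (String × Int)) : List (String × Int) :=
  let d : PySem.Dict String Int := PySem.Dict.mk data
  -- new_values = []; for value in reversed(data.values()): new_values.append(value)
  let new_values : List Int := (d.values.reverse).foldl (fun acc value => acc ++ [value]) []
  -- i = 0; for key in data.keys(): data[key] = new_values[i]; i += 1
  let st := d.keys.foldl (pvAstep new_values) (d, (0 : Int))
  st.1.items

-- ===== PORT B =====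
-- loop body of B: a, b = keys[i], keys[n-1-i]; data[a], data[b] = data[b], data[a]
-- (keys[i], keys[n-1-i] are always in range and present in the dict, so pyGetD/getD are exact)
def pvBstep (keys : List String) (n : Int) (d : PySem.Dict String Int) (i : Int) :
    PySem.Dict String Int :=
  let a := PySem.List.pyGetD keys i ""
  let b := PySem.List.pyGetD keys (n - 1 - i) ""
  let vb := d.getD b 0
  let va := d.getD a 0
  (d.insert a vb).insert b va

def reverse_keys_alt (data : List (String × Int)) : List (String × Int) :=
  let d : PySem.Dict String Int := PySem.Dict.mk data
  let keys := d.keys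
  let n : Int := keys.length
  let final := (PySem.List.pyRange 0 (PySem.Int.floordiv n 2) 1).foldl (pvBstep keys n) d
  final.items

-- ===== PRECONDITION & SPEC =====
-- Pre_ requires distinct keys: the argument models a Python dict, whose keys are always distinct,
-- so this excludes no input the Python function can ever receive.
def Pre_reverse_keys (data : List (String × Int)) : Prop := (data.map Prod.fst).Nodup
instance (data : List (String × Int)) : Decidable (Pre_reverse_keys data) := by
  unfold Pre_reverse_keys; infer_instance
def pvWitness_reverse_keys : (List (String × Int)) := [("a", 1), ("b", 2), ("c", 3)]

def Spec_reverse_keys (data : List (String × Int)) (out : List (String × Int)) : Prop :=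
  out = reverse_keys_alt data
instance (data : List (String × Int)) (out : List (String × Int)) :
    Decidable (Spec_reverse_keys data out) := by unfold Spec_reverse_keys; infer_instance

-- ===== CLAIM (what is proved, stated in full; the proofs are below) =====
def Claim_equal_reverse_keys : Prop := ∀ (data : List (String × Int)),
  Dom_reverse_keys data → Pre_reverse_keys data → Spec_reverse_keys data (reverse_keys data)

-- ===== LEMMAS AND PROOFS =====

-- A's assignment loop never changes the key set (it only overwrites existing keys)
lemma pvAloop_keys (nv : List Int) : ∀ (ks : List String) (d : PySem.Dict String Int) (i : Int),
    (∀ k ∈ ks, d.contains k = true) →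
    ((ks.foldl (pvAstep nv) (d, i)).1).keys = d.keys := by
  intro ks
  induction ks with
  | nil => intro d i _; rfl
  | cons k ks ih =>
    intro d i h
    simp only [List.foldl_cons, pvAstep]
    rw [ih]
    · exact PySem.Dict.keys_insert_of_contains _ _ (h k (by simp))
    · intro k' hk'
      rw [PySem.Dict.contains_insert]
      simp [h k' (List.mem_cons_of_mem _ hk')]

-- the value A's loop leaves at each key
lemma pvAloop_getD (nv : List Int) : ∀ (ks : List String), ks.Nodup →
    ∀ (d : PySem.Dict String Int) (i : Int) (k0 : String),
    ((ks.foldl (pvAstep nv) (d, i)).1).getD k0 0 =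
      if k0 ∈ ks then PySem.List.pyGetD nv (i + ks.idxOf k0) 0 else d.getD k0 0 := by
  intro ks
  induction ks with
  | nil => simp
  | cons k ks ih =>
    intro hnd d i k0
    simp only [List.foldl_cons, pvAstep]
    rw [ih (List.nodup_cons.mp hnd).2]
    by_cases hk : k0 = k
    · subst hk
      have hnotin : k0 ∉ ks := (List.nodup_cons.mp hnd).1
      simp [hnotin, PySem.Dict.getD_insert_self]
    · by_cases hmem : k0 ∈ ks
      · simp only [hmem, if_true, List.mem_cons, hk, false_or,
          List.idxOf_cons_ne _ (fun h => hk h.symm)]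
        congr 1
        push_cast
        ring
      · have : ¬ k0 ∈ k :: ks := by simp [hk, hmem]
        simp [hmem, this, PySem.Dict.getD_insert_of_ne _ _ _ hk]

-- B's swap loop: key set preserved, and after m swaps the first m and last m positions are reversed
lemma pvBloop (data : List (String × Int)) (hnd : (data.map Prod.fst).Nodup) :
    ∀ (m : Nat), m ≤ data.length / 2 →
      (((PySem.List.pyRange 0 (m : Int) 1).foldl
          (pvBstep (data.map Prod.fst) (data.length : Int)) (PySem.Dict.mk data)).keys
        = data.map Prod.fst)
      ∧ ∀ (j : Nat) (hj : j < data.length),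
        ((PySem.List.pyRange 0 (m : Int) 1).foldl
          (pvBstep (data.map Prod.fst) (data.length : Int)) (PySem.Dict.mk data)).getD
            ((data.map Prod.fst)[j]'(by simpa using hj)) 0 =
          (if j < m ∨ data.length - m ≤ j
           then (data.map Prod.snd)[data.length - 1 - j]'(by simp; omega)
           else (data.map Prod.snd)[j]'(by simpa using hj)) := by
  intro m
  induction m with
  | zero =>
    intro _
    rw [Nat.cast_zero, PySem.List.pyRange_one_eq_nil le_rfl]
    constructor
    · simp [PySem.Dict.keys]
    · intro j hj
      rw [if_neg (by omega), List.foldl_nil]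
      apply PySem.Dict.getD_of_mem_items
      · have : ((data.map Prod.fst)[j]'(by simpa using hj),
            (data.map Prod.snd)[j]'(by simpa using hj)) = data[j] := by simp
        rw [this]
        exact List.getElem_mem hj
      · simpa [PySem.Dict.keys] using hnd
  | succ m ih =>
    intro hm
    have hm' : m ≤ data.length / 2 := by omega
    have h2 : 2 * (m + 1) ≤ data.length := by
      have := Nat.div_mul_le_self data.length 2
      omega
    obtain ⟨ihk, ihv⟩ := ih hm'
    have hmn : m < data.length := by omega
    have hbn : data.length - 1 - m < data.length := by omega
    have hsplit : PySem.List.pyRange 0 ((m + 1 : Nat) : Int) 1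
        = PySem.List.pyRange 0 (m : Int) 1 ++ [(m : Int)] := by
      rw [show ((m + 1 : Nat) : Int) = (m : Int) + 1 by push_cast; ring,
        PySem.List.pyRange_one_succ_right (by positivity)]
    have ha : PySem.List.pyGetD (data.map Prod.fst) ((m : Nat) : Int) ""
        = (data.map Prod.fst)[m]'(by simpa using hmn) := by
      rw [PySem.List.pyGetD_natCast]
      exact List.getD_eq_getElem _ "" (by simpa using hmn)
    have hb : PySem.List.pyGetD (data.map Prod.fst)
          ((data.length : Int) - 1 - ((m : Nat) : Int)) ""
        = (data.map Prod.fst)[data.length - 1 - m]'(by simpa using hbn) := by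
      rw [show ((data.length : Int) - 1 - ((m : Nat) : Int))
            = ((data.length - 1 - m : Nat) : Int) by omega,
        PySem.List.pyGetD_natCast]
      exact List.getD_eq_getElem _ "" (by simpa using hbn)
    have hva := ihv m hmn
    rw [if_neg (by omega)] at hva
    have hvb := ihv (data.length - 1 - m) hbn
    rw [if_neg (by omega)] at hvb
    rw [hsplit, List.foldl_append]
    simp only [List.foldl_cons, List.foldl_nil, pvBstep, ha, hb, hva, hvb]
    have hknd : (data.map Prod.fst).Nodup := hnd
    have hca : ((PySem.List.pyRange 0 (m : Int) 1).foldl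
          (pvBstep (data.map Prod.fst) (data.length : Int)) (PySem.Dict.mk data)).contains
          ((data.map Prod.fst)[m]'(by simpa using hmn)) = true := by
      rw [PySem.Dict.contains_iff_mem_keys, ihk]
      exact List.getElem_mem _
    have hcb : ((PySem.List.pyRange 0 (m : Int) 1).foldl
          (pvBstep (data.map Prod.fst) (data.length : Int)) (PySem.Dict.mk data)).contains
          ((data.map Prod.fst)[data.length - 1 - m]'(by simpa using hbn)) = true := by
      rw [PySem.Dict.contains_iff_mem_keys, ihk]
      exact List.getElem_mem _
    constructor
    · rw [PySem.Dict.keys_insert_of_contains _ _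
          (by rw [PySem.Dict.contains_insert, hcb]; simp),
        PySem.Dict.keys_insert_of_contains _ _ hca, ihk]
    · intro j hj
      rw [PySem.Dict.getD_insert, PySem.Dict.getD_insert]
      have hinj := List.Nodup.getElem_inj_iff hknd
        (i := j) (j := data.length - 1 - m) (hi := by simpa using hj) (hj := by simpa using hbn)
      have hinj2 := List.Nodup.getElem_inj_iff hknd
        (i := j) (j := m) (hi := by simpa using hj) (hj := by simpa using hmn)
      by_cases hjb : j = data.length - 1 - m
      · rw [if_pos (hinj.mpr hjb), if_pos (by omega)]
        simp only [show data.length - 1 - j = m by omega]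
      · rw [if_neg (fun h => hjb (hinj.mp h))]
        by_cases hja : j = m
        · rw [if_pos (hinj2.mpr hja), if_pos (by omega)]
          simp only [show data.length - 1 - j = data.length - 1 - m by omega]
        · rw [if_neg (fun h => hja (hinj2.mp h)), ihv j hj]
          by_cases hcond : j < m ∨ data.length - m ≤ j
          · rw [if_pos hcond, if_pos (by omega)]
          · rw [if_neg hcond, if_neg (by omega)]

-- ===== VERDICT (by name: the statement is the Claim_ definition above) =====
theorem reverse_keys_spec : Claim_equal_reverse_keys := by
  intro data _ hpre
  unfold Pre_reverse_keys at hpre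
  unfold Spec_reverse_keys reverse_keys reverse_keys_alt
  dsimp only
  have hk : (PySem.Dict.mk data).keys = data.map Prod.fst := by simp [PySem.Dict.keys]
  have hv : (PySem.Dict.mk data).values = data.map Prod.snd := by simp [PySem.Dict.values]
  rw [hk, hv, PySem.List.foldl_append_singleton, List.nil_append]
  rw [show (data.map Prod.fst).length = data.length from by simp]
  rw [show PySem.Int.floordiv ((data.length : Nat) : Int) 2 = ((data.length / 2 : Nat) : Int)
      from by exact_mod_cast PySem.Int.floordiv_natCast data.length 2]
  have hcont : ∀ k ∈ data.map Prod.fst, (PySem.Dict.mk data).contains k = true := by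
    intro k hkm
    rw [PySem.Dict.contains_iff_mem_keys, hk]
    exact hkm
  have hAkeys : ((data.map Prod.fst).foldl (pvAstep (data.map Prod.snd).reverse)
      (PySem.Dict.mk data, (0 : Int))).1.keys = data.map Prod.fst := by
    rw [pvAloop_keys _ _ _ _ hcont, hk]
  obtain ⟨hBkeys, hBval⟩ := pvBloop data hpre (data.length / 2) le_rfl
  rw [PySem.Dict.items_eq_map_keys _ (by rw [hAkeys]; exact hpre) 0,
      PySem.Dict.items_eq_map_keys _ (by rw [hBkeys]; exact hpre) 0,
      hAkeys, hBkeys]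
  apply List.map_congr_left
  intro k hkm
  obtain ⟨j, hj, rfl⟩ := List.mem_iff_getElem.mp hkm
  have hjn : j < data.length := by simpa using hj
  simp only [Prod.mk.injEq, true_and]
  -- A side: the key at position j receives new_values[j] = vals.reverse[j] = vals[n-1-j]
  rw [pvAloop_getD _ _ hpre, if_pos (List.getElem_mem hj),
      List.Nodup.idxOf_getElem hpre j hj,
      show (0 : Int) + (j : Nat) = ((j : Nat) : Int) from zero_add _,
      PySem.List.pyGetD_natCast,
      List.getD_eq_getElem _ 0 (by simp; omega),
      List.getElem_reverse]
  simp only [List.length_map]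
  -- B side: the swap loop leaves vals[n-1-j] at position j
  rw [hBval j hjn]
  by_cases hcond : j < data.length / 2 ∨ data.length - data.length / 2 ≤ j
  · rw [if_pos hcond]
  · rw [if_neg hcond]
    simp only [show data.length - 1 - j = j from by omega]
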